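-- pv_equiv track=rewrite | github.com/mwooll/Ehrhart | ehrhart_polynomial/ehrhart_polynomial.py | drop_constant_dimensions
-- ===== SOURCE A (Python) =====
-- def drop_dimensions(to_reduce, keep_filter):
--     return [[val for val, keep in zip(vertex, keep_filter) if keep]
--             for vertex in to_reduce]
--
-- def drop_constant_dimensions(vertices, dimension):
--     columns = [[vertex[d] for vertex in vertices]
--                for d in range(dimension)]
--     mins = [min(col) for col in columns]
--     maxs = [max(col) for col in columns]
--
--     not_equal = [mins[d] != maxs[d] for d in range(dimension)]
--
--     vertices = drop_dimensions(vertices, not_equal)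
--     mins, maxs = drop_dimensions([mins, maxs], not_equal)
--     new_dimension = sum(not_equal)
--     return vertices, mins, maxs, new_dimension
-- ===== SOURCE B (Python) =====
-- def drop_constant_dimensions(vertices, dimension):
--     # Single streaming pass: running per-dimension min/max, no transposed columns.
--     if dimension > 0:
--         mins = list(vertices[0][:dimension])
--         maxs = list(mins)
--         for v in vertices[1:]:
--             mins = [m if m < x else x for m, x in zip(mins, v)]
--             maxs = [M if M > x else x for M, x in zip(maxs, v)]
--     else:
--         mins, maxs = [], []
--     keep = [m != M for m, M in zip(mins, maxs)]
--     new_vertices = [[x for x, k in zip(v, keep) if k] for v in vertices]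
--     return (new_vertices,
--             [m for m, k in zip(mins, keep) if k],
--             [M for M, k in zip(maxs, keep) if k],
--             sum(keep))
-- ===== Notes on version B (the rewrite author's own statement) =====
-- stated objective: alternative
-- what changed: Replaces the transpose-build (materialize all columns, then min/max each) with a single streaming pass over the vertices that maintains running per-dimension min/max vectors seeded from the first vertex; Pre_ excludes the inputs where A raises (empty vertices with positive dimension, or a vertex shorter than dimension).
import Mathlib
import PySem

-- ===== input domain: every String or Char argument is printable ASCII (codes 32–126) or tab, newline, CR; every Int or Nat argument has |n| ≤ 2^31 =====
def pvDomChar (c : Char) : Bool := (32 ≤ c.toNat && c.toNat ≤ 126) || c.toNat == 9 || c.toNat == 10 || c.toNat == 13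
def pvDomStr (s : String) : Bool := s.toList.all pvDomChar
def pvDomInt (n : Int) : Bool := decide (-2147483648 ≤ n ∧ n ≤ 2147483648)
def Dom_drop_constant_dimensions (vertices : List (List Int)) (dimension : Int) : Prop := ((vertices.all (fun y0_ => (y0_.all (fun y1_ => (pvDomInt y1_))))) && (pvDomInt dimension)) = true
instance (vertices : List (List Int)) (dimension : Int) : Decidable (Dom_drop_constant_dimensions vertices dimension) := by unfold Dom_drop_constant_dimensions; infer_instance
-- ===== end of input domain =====

-- ===== PORT A =====
-- B replaces A's transpose-then-reduce with a single streaming min/max pass (alternative decomposition, same cost).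
def pvDropDims (to_reduce : List (List Int)) (keep_filter : List Bool) : List (List Int) :=
  to_reduce.map (fun vertex =>
    ((vertex.zip keep_filter).filter (fun p => p.2)).map (fun p => p.1))

def drop_constant_dimensions (vertices : List (List Int)) (dimension : Int) : List (List Int) × List Int × List Int × Int :=
  let columns := (PySem.List.pyRange 0 dimension 1).map
    (fun d => vertices.map (fun vertex => PySem.List.pyGetD vertex d 0))
  let mins := columns.map (fun col => (PySem.List.min? col (fun x => x)).getD 0)
  let maxs := columns.map (fun col => (PySem.List.max? col (fun x => x)).getD 0)
  let not_equal := (PySem.List.pyRange 0 dimension 1).map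
    (fun d => decide (PySem.List.pyGetD mins d 0 ≠ PySem.List.pyGetD maxs d 0))
  let vertices' := pvDropDims vertices not_equal
  let mm := pvDropDims [mins, maxs] not_equal
  (vertices', mm.getD 0 [], mm.getD 1 [],
   (not_equal.map (fun b => if b then (1 : Int) else 0)).sum)

-- ===== PORT B =====
def drop_constant_dimensions_alt (vertices : List (List Int)) (dimension : Int) : List (List Int) × List Int × List Int × Int :=
  let mm : List Int × List Int :=
    if dimension > 0 then
      let m0 := (vertices.headD []).take dimension.toNat
      vertices.tail.foldl (fun p v =>
        (List.zipWith (fun m x => if m < x then m else x) p.1 v,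
         List.zipWith (fun M x => if M > x then M else x) p.2 v)) (m0, m0)
    else ([], [])
  let keep := List.zipWith (fun m M => decide (m ≠ M)) mm.1 mm.2
  let new_vertices := vertices.map (fun v =>
    ((v.zip keep).filter (fun p => p.2)).map (fun p => p.1))
  (new_vertices,
   ((mm.1.zip keep).filter (fun p => p.2)).map (fun p => p.1),
   ((mm.2.zip keep).filter (fun p => p.2)).map (fun p => p.1),
   (keep.map (fun b => if b then (1 : Int) else 0)).sum)

-- ===== PRECONDITION & SPEC =====
-- Pre_ excludes exactly the inputs where A raises: ValueError (min of an empty column when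
-- vertices = [] and dimension > 0) or IndexError (a vertex shorter than dimension).
def Pre_drop_constant_dimensions (vertices : List (List Int)) (dimension : Int) : Prop :=
  0 < dimension → vertices ≠ [] ∧ ∀ v ∈ vertices, dimension ≤ (v.length : Int)
instance (vertices : List (List Int)) (dimension : Int) : Decidable (Pre_drop_constant_dimensions vertices dimension) := by unfold Pre_drop_constant_dimensions; infer_instance
def pvWitness_drop_constant_dimensions : List (List Int) × Int := ([[1, 5, 2], [1, 7, 3]], 3)

def Spec_drop_constant_dimensions (vertices : List (List Int)) (dimension : Int) (out : List (List Int) × List Int × List Int × Int) : Prop := out = drop_constant_dimensions_alt vertices dimension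
instance (vertices : List (List Int)) (dimension : Int) (out : List (List Int) × List Int × List Int × Int) : Decidable (Spec_drop_constant_dimensions vertices dimension out) := by unfold Spec_drop_constant_dimensions; infer_instance

-- ===== CLAIM (what is proved, stated in full; the proofs are below) =====
def Claim_equal_drop_constant_dimensions : Prop := ∀ (vertices : List (List Int)) (dimension : Int), Dom_drop_constant_dimensions vertices dimension → Pre_drop_constant_dimensions vertices dimension → Spec_drop_constant_dimensions vertices dimension (drop_constant_dimensions vertices dimension)

-- ===== LEMMAS AND PROOFS =====
-- foldl of componentwise pair update splits
lemma pvPairFold (f g : List Int → List Int → List Int) (vs : List (List Int)) (a b : List Int) :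
    vs.foldl (fun p v => (f p.1 v, g p.2 v)) (a, b)
      = (vs.foldl f a, vs.foldl g b) := by
  induction vs generalizing a b with
  | nil => rfl
  | cons v vs ih => simp [List.foldl_cons, ih]

lemma pvFoldZ_len (f : Int → Int → Int) (vs : List (List Int)) (acc : List Int)
    (h : ∀ v ∈ vs, acc.length ≤ v.length) :
    (vs.foldl (fun a v => List.zipWith f a v) acc).length = acc.length := by
  induction vs generalizing acc with
  | nil => rfl
  | cons v vs ih =>
    have h1 : acc.length ≤ v.length := h v (by simp)
    have h2 : (List.zipWith f acc v).length = acc.length := by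
      simp [List.length_zipWith]; omega
    simp only [List.foldl_cons]
    rw [ih _ (by intro w hw; rw [h2]; exact h w (by simp [hw]))]
    exact h2

lemma pvFoldZ_getD (f : Int → Int → Int) (vs : List (List Int)) (acc : List Int)
    (h : ∀ v ∈ vs, acc.length ≤ v.length) (k : Nat) (hk : k < acc.length) :
    (vs.foldl (fun a v => List.zipWith f a v) acc).getD k 0
      = vs.foldl (fun x v => f x (v.getD k 0)) (acc.getD k 0) := by
  induction vs generalizing acc with
  | nil => rfl
  | cons v vs ih =>
    have h1 : acc.length ≤ v.length := h v (by simp)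
    have h2 : (List.zipWith f acc v).length = acc.length := by
      simp [List.length_zipWith]; omega
    simp only [List.foldl_cons]
    rw [ih _ (by intro w hw; rw [h2]; exact h w (by simp [hw])) (by omega)]
    congr 1
    have hkv : k < v.length := by omega
    simp [List.getD, hk, hkv, List.getElem_zipWith, h2]

lemma pvStream_min (v0 : List Int) (rest : List (List Int)) (n : Nat)
    (h : ∀ v ∈ v0 :: rest, n ≤ v.length) :
    rest.foldl (fun a v => List.zipWith (fun m x => if m < x then m else x) a v) (v0.take n)
      = (List.range n).map (fun k => rest.foldl (fun a v => min a (v.getD k 0)) (v0.getD k 0)) := by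
  have hv0 : n ≤ v0.length := h v0 (by simp)
  have hlen : (v0.take n).length = n := by simp; omega
  have hrest : ∀ v ∈ rest, (v0.take n).length ≤ v.length := by
    intro v hv; rw [hlen]; exact h v (by simp [hv])
  apply List.ext_getElem
  · rw [pvFoldZ_len _ _ _ hrest, hlen]; simp
  · intro k h1 h2
    have hk : k < n := by simpa using h2
    have e1 : (rest.foldl (fun a v => List.zipWith (fun m x => if m < x then m else x) a v) (v0.take n))[k]
        = (rest.foldl (fun a v => List.zipWith (fun m x => if m < x then m else x) a v) (v0.take n)).getD k 0 := by
      simp [List.getD, h1]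
    rw [e1, pvFoldZ_getD _ _ _ hrest k (by omega)]
    have hf : ∀ m x : Int, (if m < x then m else x) = min m x := by
      intro m x; split_ifs <;> omega
    simp only [hf]
    have : (v0.take n).getD k 0 = v0.getD k 0 := by
      simp [List.getD, hk]
    rw [this]
    simp

lemma pvStream_max (v0 : List Int) (rest : List (List Int)) (n : Nat)
    (h : ∀ v ∈ v0 :: rest, n ≤ v.length) :
    rest.foldl (fun a v => List.zipWith (fun M x => if M > x then M else x) a v) (v0.take n)
      = (List.range n).map (fun k => rest.foldl (fun a v => max a (v.getD k 0)) (v0.getD k 0)) := by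
  have hv0 : n ≤ v0.length := h v0 (by simp)
  have hlen : (v0.take n).length = n := by simp; omega
  have hrest : ∀ v ∈ rest, (v0.take n).length ≤ v.length := by
    intro v hv; rw [hlen]; exact h v (by simp [hv])
  apply List.ext_getElem
  · rw [pvFoldZ_len _ _ _ hrest, hlen]; simp
  · intro k h1 h2
    have hk : k < n := by simpa using h2
    have e1 : (rest.foldl (fun a v => List.zipWith (fun M x => if M > x then M else x) a v) (v0.take n))[k]
        = (rest.foldl (fun a v => List.zipWith (fun M x => if M > x then M else x) a v) (v0.take n)).getD k 0 := by
      simp [List.getD, h1]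
    rw [e1, pvFoldZ_getD _ _ _ hrest k (by omega)]
    have hf : ∀ m x : Int, (if m > x then m else x) = max m x := by
      intro m x; split_ifs <;> omega
    simp only [hf]
    have : (v0.take n).getD k 0 = v0.getD k 0 := by
      simp [List.getD, hk]
    rw [this]
    simp

lemma pvColsMin (v0 : List Int) (rest : List (List Int)) (dim : Int) :
    ((PySem.List.pyRange 0 dim 1).map
        (fun d => (v0 :: rest).map (fun v => PySem.List.pyGetD v d 0))).map
      (fun col => (PySem.List.min? col (fun x => x)).getD 0)
    = (List.range dim.toNat).map
        (fun k => rest.foldl (fun a v => min a (v.getD k 0)) (v0.getD k 0)) := by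
  rw [PySem.List.pyRange_one]
  simp only [List.map_map, sub_zero]
  apply List.map_congr_left
  intro k hk
  simp [PySem.List.min?_id_cons, List.foldl_map]

lemma pvColsMax (v0 : List Int) (rest : List (List Int)) (dim : Int) :
    ((PySem.List.pyRange 0 dim 1).map
        (fun d => (v0 :: rest).map (fun v => PySem.List.pyGetD v d 0))).map
      (fun col => (PySem.List.max? col (fun x => x)).getD 0)
    = (List.range dim.toNat).map
        (fun k => rest.foldl (fun a v => max a (v.getD k 0)) (v0.getD k 0)) := by
  rw [PySem.List.pyRange_one]
  simp only [List.map_map, sub_zero]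
  apply List.map_congr_left
  intro k hk
  simp [PySem.List.max?_id_cons, List.foldl_map]

lemma pvKeep (M X : List Int) (dim : Int) (hM : M.length = dim.toNat) (hX : X.length = dim.toNat) :
    (PySem.List.pyRange 0 dim 1).map
      (fun d => decide (PySem.List.pyGetD M d 0 ≠ PySem.List.pyGetD X d 0))
    = List.zipWith (fun m x => decide (m ≠ x)) M X := by
  rw [PySem.List.pyRange_one]
  simp only [List.map_map, sub_zero]
  apply List.ext_getElem
  · simp [List.length_zipWith, hM, hX]
  · intro k h1 h2
    have hk : k < dim.toNat := by simpa using h1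
    simp only [List.getElem_map, List.getElem_range, Function.comp_apply, zero_add,
      List.getElem_zipWith, PySem.List.pyGetD_natCast]
    have hkM : k < M.length := by omega
    have hkX : k < X.length := by omega
    simp [List.getD, hkM, hkX]


-- ===== VERDICT (by name: the statement is the Claim_ definition above) =====
theorem drop_constant_dimensions_spec : Claim_equal_drop_constant_dimensions := by
  intro vertices dimension hdom hpre
  unfold Spec_drop_constant_dimensions
  by_cases hd : 0 < dimension
  · obtain ⟨hne, hlen⟩ := hpre hd
    cases vertices with
    | nil => exact absurd rfl hne
    | cons v0 rest =>
      have hlen' : ∀ v ∈ v0 :: rest, dimension.toNat ≤ v.length := by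
        intro v hv
        have := hlen v hv
        omega
      simp only [drop_constant_dimensions, drop_constant_dimensions_alt, if_pos hd,
        List.headD_cons, List.tail_cons]
      rw [pvPairFold, pvStream_min v0 rest dimension.toNat hlen',
        pvStream_max v0 rest dimension.toNat hlen',
        pvColsMin v0 rest dimension, pvColsMax v0 rest dimension,
        pvKeep _ _ dimension (by simp) (by simp)]
      simp [pvDropDims]
  · simp only [drop_constant_dimensions, drop_constant_dimensions_alt, if_neg hd,
      PySem.List.pyRange_one_eq_nil (by omega : dimension ≤ (0:Int))]
    simp [pvDropDims]
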